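-- pv_equiv track=rewrite | github.com/Justin21523/data-structure-practice | 01-introduction-and-complexity/01-asymptotic-notation/python/asymptotic_demo.py | count_n_log2_n_ops
-- ===== SOURCE A (Python) =====
-- def _require_non_negative(n: int) -> int:  # Validate inputs so counts remain well-defined.
--     """檢查 n >= 0 / Require n >= 0."""  # Short bilingual docstring for this helper.
--     if n < 0:  # Reject negative sizes because they do not make sense for complexity.
--         raise ValueError("n must be >= 0")  # Signal invalid input to the caller.
--     return n  # Return the validated value so callers can chain calls.
--
-- def count_n_log2_n_ops(n: int) -> int:  # Provide an n log n example via nested (n, log n) loops.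
--     """外層 n 次、內層 log n 次（O(n log n)）/ Outer n loop, inner log n loop (O(n log n))."""  # Describe the pattern.
--     n = _require_non_negative(n)  # Validate n so the outer loop is well-defined.
--     if n == 0:  # Handle the boundary case explicitly to keep the demo intuitive.
--         return 0  # Zero work for zero-sized input.
--     operations = 0  # Initialize the simulated operation counter.
--     for _ in range(n):  # Outer loop runs n times (linear factor).
--         current = n  # Inner loop starts with size n each time (same order).
--         while current > 1:  # Inner loop halves current each time (logarithmic factor).
--             current //= 2  # Halve the inner problem size.
--             operations += 1  # Count one basic operation per inner iteration.
--     return operations  # Return approximately n * floor(log2(n)).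
-- ===== SOURCE B (Python) =====
-- def count_n_log2_n_ops(n: int) -> int:
--     if n < 0:
--         raise ValueError("n must be >= 0")
--     return n * (n.bit_length() - 1) if n > 0 else 0
-- ===== Notes on version B (the rewrite author's own statement) =====
-- stated objective: faster
-- what changed: Replaces the nested n-by-log(n) counting loops with the closed form n*(n.bit_length()-1).
import Mathlib
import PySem

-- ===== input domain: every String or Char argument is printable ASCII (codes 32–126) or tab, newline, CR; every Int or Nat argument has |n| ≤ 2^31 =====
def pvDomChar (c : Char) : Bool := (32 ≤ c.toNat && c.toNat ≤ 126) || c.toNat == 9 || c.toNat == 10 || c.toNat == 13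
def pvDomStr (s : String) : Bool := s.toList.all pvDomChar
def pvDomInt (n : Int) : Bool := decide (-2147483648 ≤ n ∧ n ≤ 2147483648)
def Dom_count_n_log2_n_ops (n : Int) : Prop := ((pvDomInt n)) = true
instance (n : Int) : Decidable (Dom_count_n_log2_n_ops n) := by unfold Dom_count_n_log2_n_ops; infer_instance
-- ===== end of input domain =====

-- B replaces A's nested n x log(n) counting loops with the closed form n*(bit_length(n)-1): asymptotically faster (O(1)).

-- ===== PORT A =====
-- inner 'while current > 1: current //= 2; operations += 1' loop of A
def pyHalveLoop (current : Int) (ops : Int) : Int :=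
  if current > 1 then pyHalveLoop (PySem.Int.floordiv current 2) (ops + 1) else ops
termination_by current.toNat
decreasing_by
  simp [PySem.Int.floordiv, Int.fdiv_eq_ediv]
  omega

def count_n_log2_n_ops (n : Int) : Int :=
  -- _require_non_negative raises for n < 0 (outside Pre_); port returns 0 there
  if n < 0 then 0
  else if n = 0 then 0
  else (PySem.List.pyRange 0 n 1).foldl (fun ops _ => pyHalveLoop n ops) 0

-- ===== PORT B =====
def count_n_log2_n_ops_alt (n : Int) : Int :=
  -- 'raise ValueError' for n < 0 is outside Pre_; port returns 0 there
  if n < 0 then 0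
  else if n > 0 then n * ((Nat.log2 n.toNat + 1 : Int) - 1)  -- n.bit_length() - 1
  else 0

-- ===== PRECONDITION & SPEC =====
-- Pre_ excludes exactly n < 0, where A raises ValueError (and B raises too).
def Pre_count_n_log2_n_ops (n : Int) : Prop := 0 <= n
instance (n : Int) : Decidable (Pre_count_n_log2_n_ops n) := by unfold Pre_count_n_log2_n_ops; infer_instance
def pvWitness_count_n_log2_n_ops : Int := 5
def Spec_count_n_log2_n_ops (n : Int) (out : Int) : Prop := out = count_n_log2_n_ops_alt n
instance (n : Int) (out : Int) : Decidable (Spec_count_n_log2_n_ops n out) := by unfold Spec_count_n_log2_n_ops; infer_instance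

-- ===== CLAIM (what is proved, stated in full; the proofs are below) =====
def Claim_equal_count_n_log2_n_ops : Prop := ∀ (n : Int), Dom_count_n_log2_n_ops n → Pre_count_n_log2_n_ops n → Spec_count_n_log2_n_ops n (count_n_log2_n_ops n)

-- ===== LEMMAS AND PROOFS =====

-- the inner while loop counts exactly Nat.log2 of the starting value
theorem pyHalveLoop_eq (current ops : Int) :
    pyHalveLoop current ops = ops + Nat.log2 current.toNat := by
  rw [pyHalveLoop.eq_def]
  split
  · rename_i h
    rw [pyHalveLoop_eq (PySem.Int.floordiv current 2) (ops + 1)]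
    have h2 : (PySem.Int.floordiv current 2).toNat = current.toNat / 2 := by
      simp [PySem.Int.floordiv, Int.fdiv_eq_ediv]
      omega
    rw [h2]
    have h3 : 2 <= current.toNat := by omega
    conv_rhs => rw [Nat.log2_def]
    simp [h3]
    omega
  · rename_i h
    have h3 : ¬ (2 <= current.toNat) := by omega
    rw [Nat.log2_def]
    simp [h3]
termination_by current.toNat
decreasing_by
  simp [PySem.Int.floordiv, Int.fdiv_eq_ediv]
  omega

theorem foldl_const_add (l : List Int) (a k : Int) :
    l.foldl (fun ops _ => ops + k) a = a + l.length * k := by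
  induction l generalizing a with
  | nil => simp
  | cons x xs ih => simp [List.foldl, ih]; ring

-- ===== VERDICT (by name: the statement is the Claim_ definition above) =====
theorem count_n_log2_n_ops_spec : Claim_equal_count_n_log2_n_ops := by
  intro n _ hpre
  unfold Spec_count_n_log2_n_ops count_n_log2_n_ops count_n_log2_n_ops_alt
  unfold Pre_count_n_log2_n_ops at hpre
  have hn : ¬ (n < 0) := by omega
  simp only [hn, if_false]
  by_cases h0 : n = 0
  · simp [h0]
  · have hpos : 0 < n := by omega
    simp only [h0, if_false, hpos, if_true]
    have hfun : (fun (ops : Int) (_ : Int) => pyHalveLoop n ops)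
        = (fun (ops : Int) (_ : Int) => ops + (Nat.log2 n.toNat : Int)) := by
      funext ops x
      exact pyHalveLoop_eq n ops
    rw [hfun, foldl_const_add, PySem.List.length_pyRange_one]
    have : ((n - 0).toNat : Int) = n := by omega
    rw [this]
    ring
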